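-- pv_equiv track=rewrite | github.com/pablofarias19/sentency | App_colaborativa/colaborative/scripts/extractor_metadata_argentina.py | validar_metadata
-- ===== SOURCE A (Python) =====
-- from typing import Dict, List, Optional, Tuple
--
-- def validar_metadata(metadata: Dict) -> Tuple[bool, List[str]]:
--     """
--     Valida que la metadata tenga los campos mínimos necesarios
--
--     Returns:
--         Tupla (es_valido, lista_errores)
--     """
--     errores = []
--
--     # Campos obligatorios
--     if not metadata.get('juez'):
--         errores.append("Falta identificar el juez")
--
--     if not metadata.get('expediente'):
--         errores.append("Falta número de expediente")
--
--     if not metadata.get('fecha_sentencia'):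
--         errores.append("Falta fecha de sentencia")
--
--     # Advertencias (no bloquean)
--     if not metadata.get('caratula'):
--         errores.append("Advertencia: No se pudo extraer carátula")
--
--     if not metadata.get('fuero'):
--         errores.append("Advertencia: No se pudo identificar fuero")
--
--     es_valido = len([e for e in errores if not e.startswith('Advertencia')]) == 0
--
--     return es_valido, errores
-- ===== SOURCE B (Python) =====
-- def validar_metadata(metadata):
--     """Table-driven validation: one pass over specs with an accumulated validity flag."""
--     specs = [
--         ('juez', "Falta identificar el juez", True),
--         ('expediente', "Falta número de expediente", True),
--         ('fecha_sentencia', "Falta fecha de sentencia", True),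
--         ('caratula', "Advertencia: No se pudo extraer carátula", False),
--         ('fuero', "Advertencia: No se pudo identificar fuero", False),
--     ]
--     es_valido = True
--     errores = []
--     for key, msg, required in specs:
--         if not metadata.get(key):
--             errores.append(msg)
--             if required:
--                 es_valido = False
--     return es_valido, errores
-- ===== Notes on version B (the rewrite author's own statement) =====
-- stated objective: simpler
-- what changed: Replaces the five hand-written if-blocks plus a post-hoc filter over error strings testing the 'Advertencia' prefix with a single table-driven loop over (field, message, required) specs that accumulates the validity flag directly.
import Mathlib
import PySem

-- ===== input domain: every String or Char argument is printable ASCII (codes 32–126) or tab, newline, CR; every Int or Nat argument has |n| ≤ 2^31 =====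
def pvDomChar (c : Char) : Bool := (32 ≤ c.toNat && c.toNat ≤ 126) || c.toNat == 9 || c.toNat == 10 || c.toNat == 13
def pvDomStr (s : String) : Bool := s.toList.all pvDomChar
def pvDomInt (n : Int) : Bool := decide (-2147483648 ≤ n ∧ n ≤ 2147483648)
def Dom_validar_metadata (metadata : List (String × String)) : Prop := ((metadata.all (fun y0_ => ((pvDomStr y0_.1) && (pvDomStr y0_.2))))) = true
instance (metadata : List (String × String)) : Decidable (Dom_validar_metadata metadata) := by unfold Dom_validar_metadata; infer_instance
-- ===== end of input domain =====

-- B replaces A's five if-blocks and post-hoc 'Advertencia'-prefix scan by a table-driven fold that accumulates the validity flag directly (objective: simpler).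

-- shared dict-lookup primitive: metadata.get(k) with "" for a missing key (first match, as 'not metadata.get(k)' only tests falsiness)
def pvGet (m : List (String × String)) (k : String) : String :=
  ((m.find? (fun p => p.1 == k)).map (·.2)).getD ""

-- ===== PORT A =====
def validar_metadata (metadata : List (String × String)) : Bool × List String :=
  let errores : List String := []
  let errores := if pvGet metadata "juez" = "" then errores ++ ["Falta identificar el juez"] else errores
  let errores := if pvGet metadata "expediente" = "" then errores ++ ["Falta número de expediente"] else errores
  let errores := if pvGet metadata "fecha_sentencia" = "" then errores ++ ["Falta fecha de sentencia"] else errores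
  let errores := if pvGet metadata "caratula" = "" then errores ++ ["Advertencia: No se pudo extraer carátula"] else errores
  let errores := if pvGet metadata "fuero" = "" then errores ++ ["Advertencia: No se pudo identificar fuero"] else errores
  let es_valido := (errores.filter (fun e => !(PySem.Str.startswith e "Advertencia"))).length = 0
  (es_valido, errores)

-- ===== PORT B =====
def pvSpecs : List (String × String × Bool) :=
  [("juez", "Falta identificar el juez", true),
   ("expediente", "Falta número de expediente", true),
   ("fecha_sentencia", "Falta fecha de sentencia", true),
   ("caratula", "Advertencia: No se pudo extraer carátula", false),
   ("fuero", "Advertencia: No se pudo identificar fuero", false)]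

def validar_metadata_alt (metadata : List (String × String)) : Bool × List String :=
  pvSpecs.foldl
    (fun st spec =>
      if pvGet metadata spec.1 = "" then
        (if spec.2.2 then false else st.1, st.2 ++ [spec.2.1])
      else st)
    (true, [])

-- ===== PRECONDITION & SPEC =====
def Spec_validar_metadata (metadata : List (String × String)) (out : Bool × List String) : Prop := out = validar_metadata_alt metadata
instance (metadata : List (String × String)) (out : Bool × List String) : Decidable (Spec_validar_metadata metadata out) := by unfold Spec_validar_metadata; infer_instance

-- ===== CLAIM (what is proved, stated in full; the proofs are below) =====
def Claim_equal_validar_metadata : Prop := ∀ (metadata : List (String × String)), Dom_validar_metadata metadata → Spec_validar_metadata metadata (validar_metadata metadata)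

-- ===== LEMMAS AND PROOFS =====

-- ===== VERDICT (by name: the statement is the Claim_ definition above) =====
theorem validar_metadata_spec : Claim_equal_validar_metadata := by
  intro m _
  unfold Spec_validar_metadata validar_metadata validar_metadata_alt pvSpecs
  by_cases h1 : pvGet m "juez" = "" <;>
  by_cases h2 : pvGet m "expediente" = "" <;>
  by_cases h3 : pvGet m "fecha_sentencia" = "" <;>
  by_cases h4 : pvGet m "caratula" = "" <;>
  by_cases h5 : pvGet m "fuero" = "" <;>
    simp only [List.foldl, h1, h2, h3, h4, h5, if_pos, if_neg, not_false_iff] <;> decide
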